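-- pv_equiv track=rewrite | github.com/Jangeunhye/Algorithm | 프로그래머스/1/1845. 폰켓몬/폰켓몬.py | solution
-- ===== SOURCE A (Python) =====
-- def solution(nums):
--     temp = set(nums)
--     answer=0
--
--     for i in range(len(nums)//2):
--         temp.pop()
--         answer+=1
--         if(len(temp)<=0):
--             break
--
--     return answer
-- ===== SOURCE B (Python) =====
-- def solution(nums):
--     return min(len(set(nums)), len(nums) // 2)
-- ===== Notes on version B (the rewrite author's own statement) =====
-- stated objective: simpler
-- what changed: Replaces A's pop-and-count loop over the set with the closed form min(len(set(nums)), len(nums)//2).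
import Mathlib
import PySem

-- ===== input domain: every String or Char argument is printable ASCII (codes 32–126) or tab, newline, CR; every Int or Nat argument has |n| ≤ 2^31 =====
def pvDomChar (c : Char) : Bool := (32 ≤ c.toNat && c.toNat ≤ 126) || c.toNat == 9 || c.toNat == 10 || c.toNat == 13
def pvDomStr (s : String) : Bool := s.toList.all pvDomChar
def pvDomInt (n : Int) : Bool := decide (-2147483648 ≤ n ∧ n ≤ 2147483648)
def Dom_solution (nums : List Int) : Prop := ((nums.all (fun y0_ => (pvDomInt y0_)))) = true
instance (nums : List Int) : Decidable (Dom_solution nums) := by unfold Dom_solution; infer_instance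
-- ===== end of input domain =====

-- B replaces A's pop-and-count loop with the closed form min(len(set(nums)), len(nums)//2); objective: simpler.


-- ===== PORT A =====
-- the 'for i in range(len(nums)//2)' loop: k = remaining iterations, temp = the set, answer = the counter;
-- temp.pop() removes the first element of the Set's list (only the resulting COUNT is returned, so order is immaterial);
-- the [] branch is unreachable for inputs of the form set(nums) with this bound (the break fires first)
def solutionLoopA : Nat → List Int → Int → Int
  | 0, _, answer => answer
  | Nat.succ k, temp, answer =>
    match temp with
    | [] => answer
    | _ :: ts =>
      let answer := answer + 1
      if ts.length ≤ 0 then answer else solutionLoopA k ts answer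

def solution (nums : List Int) : Int :=
  solutionLoopA (nums.length / 2) (PySem.Set.ofList nums) 0

-- ===== PORT B =====
def solution_alt (nums : List Int) : Int :=
  min ((PySem.Set.ofList nums).length : Int) (PySem.Int.floordiv (nums.length : Int) 2)

-- ===== PRECONDITION & SPEC =====
def Spec_solution (nums : List Int) (out : Int) : Prop := out = solution_alt nums
instance (nums : List Int) (out : Int) : Decidable (Spec_solution nums out) := by unfold Spec_solution; infer_instance

-- ===== CLAIM (what is proved, stated in full; the proofs are below) =====
def Claim_equal_solution : Prop := ∀ (nums : List Int), Dom_solution nums → Spec_solution nums (solution nums)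

-- ===== LEMMAS AND PROOFS =====
theorem solutionLoopA_eq (k : Nat) (temp : List Int) (answer : Int) :
    solutionLoopA k temp answer = answer + min (temp.length : Int) (k : Int) := by
  induction k generalizing temp answer with
  | zero => simp [solutionLoopA]
  | succ k ih =>
    cases temp with
    | nil => simp [solutionLoopA]; positivity
    | cons t ts =>
      simp only [solutionLoopA]
      by_cases h : ts.length ≤ 0
      · simp only [if_pos h]
        have : ts.length = 0 := Nat.le_zero.mp h
        simp [this]
      · simp only [if_neg h, ih]
        simp only [List.length_cons]
        push_cast
        omega

-- ===== VERDICT (by name: the statement is the Claim_ definition above) =====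
theorem solution_spec : Claim_equal_solution := by
  intro nums _
  unfold Spec_solution solution solution_alt
  rw [solutionLoopA_eq]
  have h2 : PySem.Int.floordiv (nums.length : Int) 2 = ((nums.length / 2 : Nat) : Int) := by
    simp only [PySem.Int.floordiv, Int.fdiv_eq_ediv]
    omega
  rw [h2]; ring
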